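-- pv_equiv track=rewrite | github.com/gone-still/codingQuestions | 037 - maxSatisfaction/maxSatisfaction.py | maxSatisfaction
-- ===== SOURCE A (Python) =====
-- def maxSatisfaction(inputList):
--     # Sort the list:
--     inputList.sort()
--
--     # Base variables:
--     listLength = len(inputList)
--     totalSatisfaction = 0
--     accumulator = 0
--
--     # Loop through the list in reverse. Get current satisfaction value,
--     # carry it over every iteration until the accumulated satisfaction is
--     # negative. Additionally, sum-accumulate it during each iteration, this is
--     # the total satisfaction level so far.
--     for i in range(listLength - 1, -1, -1):
--         currentSatisfaction = inputList[i]
--         accumulator = accumulator + currentSatisfaction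
--         # Stop if satisfaction accumulator is negative:
--         if (accumulator < 0):
--             break
--         # Accumulate each satisfaction value computed during
--         # each iteration:
--         totalSatisfaction = totalSatisfaction + accumulator
--
--     # Done
--     return totalSatisfaction
-- ===== SOURCE B (Python) =====
-- def maxSatisfaction(inputList):
--     # Sort ascending (in place, like A).
--     inputList.sort()
--     n = len(inputList)
--     # Full like-time coefficient when every dish is kept, and the total sum.
--     suffix = sum(inputList)
--     cur = 0
--     for i in range(n):
--         cur += (i + 1) * inputList[i]
--     # Shed the smallest dishes one at a time, tracking the best candidate;
--     # the seed 0 is the empty selection.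
--     best = 0
--     for r in range(n):
--         best = max(best, cur)
--         cur -= suffix
--         suffix -= inputList[r]
--     return best
-- ===== Notes on version B (the rewrite author's own statement) =====
-- stated objective: alternative
-- what changed: Instead of A's reverse accumulation of suffix sums with an early break, B computes the full rank-weighted coefficient once and then sheds the smallest dishes front-to-back, maintaining the candidate value and a running maximum seeded at 0.
import Mathlib
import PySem

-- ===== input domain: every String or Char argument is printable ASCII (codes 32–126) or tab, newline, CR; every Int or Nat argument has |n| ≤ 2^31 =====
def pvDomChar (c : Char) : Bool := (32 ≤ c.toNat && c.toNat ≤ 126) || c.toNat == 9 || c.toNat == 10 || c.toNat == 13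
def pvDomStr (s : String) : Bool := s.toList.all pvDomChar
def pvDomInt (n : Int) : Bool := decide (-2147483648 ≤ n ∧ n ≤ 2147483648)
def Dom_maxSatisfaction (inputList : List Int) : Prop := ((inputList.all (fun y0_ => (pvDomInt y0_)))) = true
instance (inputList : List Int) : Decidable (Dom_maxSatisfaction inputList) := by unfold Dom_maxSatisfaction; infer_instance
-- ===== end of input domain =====

-- B replaces A's reverse accumulation-with-break by a forward shedding pass over the
-- full rank-weighted coefficient tracking a running maximum (alternative algorithm,
-- same cost). Both Pythons sort the argument in place; the equivalence proved is
-- about the return value.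

-- ===== PORT A =====
-- for i in range(listLength-1, -1, -1): acc += lst[i]; if acc < 0: break; total += acc
def pvLoopA (ys : List Int) : List Int → Int → Int → Int
  | [], _, total => total
  | i :: rest, acc, total =>
    match PySem.List.pyGet? ys i with
    | none => total      -- unreachable: every generated index is in range
    | some cur =>
      let acc' := acc + cur
      if acc' < 0 then total
      else pvLoopA ys rest acc' (total + acc')

def maxSatisfaction (inputList : List Int) : Int :=
  let ys := PySem.List.sorted inputList (fun x => x) false
  let listLength : Int := ys.length
  pvLoopA ys (PySem.List.pyRange (listLength - 1) (-1) (-1)) 0 0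

-- ===== PORT B =====
-- for i in range(n): cur += (i+1) * lst[i]
def pvCoefB (ys : List Int) : List Int → Int → Int
  | [], cur => cur
  | i :: rest, cur =>
    match PySem.List.pyGet? ys i with
    | none => cur        -- unreachable
    | some v => pvCoefB ys rest (cur + (i + 1) * v)

-- for r in range(n): best = max(best, cur); cur -= suffix; suffix -= lst[r]
def pvLoopB (ys : List Int) : List Int → Int → Int → Int → Int
  | [], _, _, best => best
  | r :: rest, suffix, cur, best =>
    let best' := max best cur
    match PySem.List.pyGet? ys r with
    | none => best'      -- unreachable
    | some v => pvLoopB ys rest (suffix - v) (cur - suffix) best'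

def maxSatisfaction_alt (inputList : List Int) : Int :=
  let ys := PySem.List.sorted inputList (fun x => x) false
  let n : Int := ys.length
  let suffix := ys.sum
  let cur := pvCoefB ys (PySem.List.pyRange 0 n 1) 0
  pvLoopB ys (PySem.List.pyRange 0 n 1) suffix cur 0

-- ===== PRECONDITION & SPEC =====
def Spec_maxSatisfaction (inputList : List Int) (out : Int) : Prop := out = maxSatisfaction_alt inputList
instance (inputList : List Int) (out : Int) : Decidable (Spec_maxSatisfaction inputList out) := by unfold Spec_maxSatisfaction; infer_instance

-- ===== CLAIM (what is proved, stated in full; the proofs are below) =====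
def Claim_equal_maxSatisfaction : Prop := ∀ (inputList : List Int), Dom_maxSatisfaction inputList → Spec_maxSatisfaction inputList (maxSatisfaction inputList)

-- ===== LEMMAS AND PROOFS =====

-- A's loop on the reversed sorted list: acc := acc + z; stop when negative.
def pvGrun : List Int → Int → Int → Int
  | [], _, t => t
  | z :: r, a, t => if a + z < 0 then t else pvGrun r (a + z) (t + (a + z))

-- max over k ∈ [0..n] of Σ_{i≤k} (a + prefix-sum_i)
def pvMaxT : List Int → Int → Int
  | [], _ => 0
  | z :: r, a => max 0 ((a + z) + pvMaxT r (a + z))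

-- the full sum Σ_{i≤n} (a + prefix-sum_i)
def pvFtot : List Int → Int → Int
  | [], _ => 0
  | z :: r, a => (a + z) + pvFtot r (a + z)

-- like-time coefficient Σ (i+1)·l_i via suffix recursion
def pvCw : List Int → Int
  | [] => 0
  | x :: r => (x :: r).sum + pvCw r

-- weighted sum with starting weight w
def pvWsum : List Int → Int → Int
  | [], _ => 0
  | x :: r, w => w * x + pvWsum r (w + 1)

-- max over suffixes of the coefficient (seeded by 0 at the empty suffix)
def pvNb : List Int → Int
  | [] => 0
  | x :: r => max (pvCw (x :: r)) (pvNb r)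

-- B's second loop, index-free
def pvBRec : List Int → Int → Int → Int → Int
  | [], _, _, b => b
  | v :: rest, s, c, b => pvBRec rest (s - v) (c - s) (max b c)

theorem pvLoopA_eq_Grun (ys : List Int) :
    ∀ (m : Nat), m ≤ ys.length → ∀ a t,
      pvLoopA ys (PySem.List.pyRange ((m : Int) - 1) (-1) (-1)) a t
        = pvGrun ((ys.take m).reverse) a t := by
  intro m
  induction m with
  | zero =>
    intro _ a t
    rw [PySem.List.pyRange_neg_one_eq_nil (by omega)]
    simp [pvLoopA, pvGrun]
  | succ m ih =>
    intro hm a t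
    have hc : ((m + 1 : Nat) : Int) - 1 = (m : Int) := by push_cast; ring
    rw [hc, PySem.List.pyRange_neg_one_cons (by omega)]
    have hlt : m < ys.length := by omega
    have htake : (ys.take (m + 1)).reverse = ys[m] :: (ys.take m).reverse := by
      rw [List.take_add_one, List.getElem?_eq_getElem hlt]
      simp
    rw [htake]
    simp only [pvLoopA, PySem.List.pyGet?_natCast, List.getElem?_eq_getElem hlt, pvGrun]
    split
    · rfl
    · exact ih (by omega) _ _

theorem pvMaxT_nonneg : ∀ (l : List Int) (a : Int), 0 ≤ pvMaxT l a := by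
  intro l a
  cases l with
  | nil => simp [pvMaxT]
  | cons z r => simp [pvMaxT]

theorem pvMaxT_neg : ∀ (l : List Int), (∀ y ∈ l, y ≤ 0) → ∀ a, a < 0 → pvMaxT l a = 0 := by
  intro l
  induction l with
  | nil => intro _ a _; rfl
  | cons z r ih =>
    intro h a ha
    have hz : z ≤ 0 := h z (by simp)
    have := ih (fun y hy => h y (by simp [hy])) (a + z) (by omega)
    simp only [pvMaxT, this]
    omega

theorem pvGrun_eq_MaxT : ∀ (zs : List Int), zs.Pairwise (fun x y => y ≤ x) →
    ∀ a, 0 ≤ a → ∀ t, pvGrun zs a t = t + pvMaxT zs a := by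
  intro zs
  induction zs with
  | nil => intro _ a _ t; simp [pvGrun, pvMaxT]
  | cons z r ih =>
    intro hp a ha t
    rcases List.pairwise_cons.mp hp with ⟨hz, hr⟩
    by_cases hneg : a + z < 0
    · have hzneg : z < 0 := by omega
      have h0 : pvMaxT r (a + z) = 0 :=
        pvMaxT_neg r (fun y hy => by have := hz y hy; omega) (a + z) hneg
      simp only [pvGrun, pvMaxT, if_pos hneg, h0]
      omega
    · have := ih hr (a + z) (by omega) (t + (a + z))
      simp only [pvGrun, pvMaxT, if_neg hneg, this]
      have := pvMaxT_nonneg r (a + z)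
      omega

theorem pvFtot_snoc : ∀ (zs : List Int) (x a : Int),
    pvFtot (zs ++ [x]) a = pvFtot zs a + (a + zs.sum + x) := by
  intro zs
  induction zs with
  | nil => intro x a; simp [pvFtot]
  | cons z r ih =>
    intro x a
    simp only [List.cons_append, pvFtot, ih, List.sum_cons]
    ring

theorem pvMaxT_snoc : ∀ (zs : List Int) (x a : Int),
    pvMaxT (zs ++ [x]) a = max (pvMaxT zs a) (pvFtot (zs ++ [x]) a) := by
  intro zs
  induction zs with
  | nil => intro x a; simp [pvMaxT, pvFtot]
  | cons z r ih =>
    intro x a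
    simp only [List.cons_append, pvMaxT, pvFtot, ih]
    omega

theorem pvCw_eq_Ftot_reverse : ∀ (l : List Int), pvCw l = pvFtot l.reverse 0 := by
  intro l
  induction l with
  | nil => rfl
  | cons x r ih =>
    simp only [pvCw, List.reverse_cons, pvFtot_snoc, List.sum_reverse, List.sum_cons, ← ih]
    omega

theorem pvNb_eq_MaxT_reverse : ∀ (l : List Int), pvNb l = pvMaxT l.reverse 0 := by
  intro l
  induction l with
  | nil => rfl
  | cons x r ih =>
    rw [List.reverse_cons, pvMaxT_snoc, ← ih, ← List.reverse_cons, ← pvCw_eq_Ftot_reverse]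
    simp only [pvNb]
    omega

theorem pvNb_nonneg : ∀ (l : List Int), 0 ≤ pvNb l := by
  intro l
  induction l with
  | nil => simp [pvNb]
  | cons x r ih => simp only [pvNb]; omega

theorem pvWsum_succ : ∀ (l : List Int) (w : Int), pvWsum l (w + 1) = pvWsum l w + l.sum := by
  intro l
  induction l with
  | nil => intro w; simp [pvWsum]
  | cons x r ih =>
    intro w
    simp only [pvWsum, List.sum_cons, ih (w + 1)]
    ring

theorem pvCw_eq_Wsum : ∀ (l : List Int), pvCw l = pvWsum l 1 := by
  intro l
  induction l with
  | nil => rfl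
  | cons x r ih =>
    simp only [pvCw, pvWsum, List.sum_cons, ih]
    rw [pvWsum_succ r 1]
    ring

theorem pvCoefB_eq_Wsum (ys : List Int) :
    ∀ (k m : Nat), m + k = ys.length → ∀ c,
      pvCoefB ys (PySem.List.pyRange (m : Int) (ys.length : Int) 1) c
        = c + pvWsum (ys.drop m) ((m : Int) + 1) := by
  intro k
  induction k with
  | zero =>
    intro m hm c
    rw [PySem.List.pyRange_one_eq_nil (by omega)]
    have hd : List.drop m ys = [] := List.drop_of_length_le (by omega)
    simp [pvCoefB, hd, pvWsum]
  | succ k ih =>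
    intro m hm c
    have hlt : m < ys.length := by omega
    rw [PySem.List.pyRange_one_cons (by exact_mod_cast (by omega : (m : Int) < ys.length))]
    have hdrop : ys.drop m = ys[m] :: ys.drop (m + 1) := by
      rw [List.drop_eq_getElem_cons hlt]
    simp only [pvCoefB, PySem.List.pyGet?_natCast, List.getElem?_eq_getElem hlt, hdrop,
      show ((m : Int) + 1) = ((m + 1 : Nat) : Int) by push_cast; ring]
    rw [ih (m + 1) (by omega)]
    simp only [pvWsum]
    push_cast
    ring

theorem pvLoopB_eq_BRec (ys : List Int) :
    ∀ (k m : Nat), m + k = ys.length → ∀ s c b,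
      pvLoopB ys (PySem.List.pyRange (m : Int) (ys.length : Int) 1) s c b
        = pvBRec (ys.drop m) s c b := by
  intro k
  induction k with
  | zero =>
    intro m hm s c b
    rw [PySem.List.pyRange_one_eq_nil (by omega)]
    have hd : List.drop m ys = [] := List.drop_of_length_le (by omega)
    simp [pvLoopB, hd, pvBRec]
  | succ k ih =>
    intro m hm s c b
    have hlt : m < ys.length := by omega
    rw [PySem.List.pyRange_one_cons (by exact_mod_cast (by omega : (m : Int) < ys.length))]
    rw [List.drop_eq_getElem_cons hlt]
    simp only [pvLoopB, pvBRec, PySem.List.pyGet?_natCast, List.getElem?_eq_getElem hlt,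
      show ((m : Int) + 1) = ((m + 1 : Nat) : Int) by push_cast; ring]
    exact ih (m + 1) (by omega) _ _ _

theorem pvBRec_eq_Nb : ∀ (l : List Int) (b : Int), 0 ≤ b →
    pvBRec l l.sum (pvCw l) b = max b (pvNb l) := by
  intro l
  induction l with
  | nil => intro b hb; simp [pvBRec, pvNb]; omega
  | cons v r ih =>
    intro b hb
    have h1 : (v :: r).sum - v = r.sum := by simp [List.sum_cons]
    have h2 : pvCw (v :: r) - (v :: r).sum = pvCw r := by simp [pvCw]
    simp only [pvBRec, h1, h2]
    rw [ih (max b (pvCw (v :: r))) (by omega)]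
    simp only [pvNb]
    omega

theorem pvSorted_le (l : List Int) :
    (PySem.List.sorted l (fun x => x) false).Pairwise (· ≤ ·) := by
  have := PySem.List.sorted_pairwise l (fun x => x) (κ := Int)
  simpa using this

theorem maxSatisfaction_eq_Nb (l : List Int) :
    maxSatisfaction l = pvNb (PySem.List.sorted l (fun x => x) false) := by
  set ys := PySem.List.sorted l (fun x => x) false with hys
  show pvLoopA ys (PySem.List.pyRange ((ys.length : Int) - 1) (-1) (-1)) 0 0 = pvNb ys
  rw [pvLoopA_eq_Grun ys ys.length (le_refl _) 0 0, List.take_length]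
  have hp : ys.reverse.Pairwise (fun x y => y ≤ x) := by
    rw [List.pairwise_reverse]
    exact pvSorted_le l
  rw [pvGrun_eq_MaxT ys.reverse hp 0 (le_refl 0) 0, ← pvNb_eq_MaxT_reverse]
  omega

theorem maxSatisfaction_alt_eq_Nb (l : List Int) :
    maxSatisfaction_alt l = pvNb (PySem.List.sorted l (fun x => x) false) := by
  set ys := PySem.List.sorted l (fun x => x) false with hys
  show pvLoopB ys (PySem.List.pyRange ((0 : Nat) : Int) (ys.length : Int) 1) ys.sum
      (pvCoefB ys (PySem.List.pyRange ((0 : Nat) : Int) (ys.length : Int) 1) 0) 0 = pvNb ys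
  rw [pvCoefB_eq_Wsum ys ys.length 0 (by omega) 0,
      pvLoopB_eq_BRec ys ys.length 0 (by omega)]
  simp only [List.drop_zero, Nat.cast_zero, zero_add]
  rw [← pvCw_eq_Wsum]
  rw [pvBRec_eq_Nb ys 0 (le_refl 0)]
  have := pvNb_nonneg ys
  omega

-- ===== VERDICT (by name: the statement is the Claim_ definition above) =====
theorem maxSatisfaction_spec : Claim_equal_maxSatisfaction := by
  intro l _
  unfold Spec_maxSatisfaction
  rw [maxSatisfaction_eq_Nb, maxSatisfaction_alt_eq_Nb]
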